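-- pv_equiv track=rewrite | github.com/pm012/PySandbox | Courses/CISCO/Python2/Module2/cipher_with_fibonacci.py | encode_to_string
-- ===== SOURCE A (Python) =====
-- def fibonacci(n):
--     a, b = 0, 1
--     for _ in range(n):
--         a, b = b, a + b
--     return a
--
-- def encode_to_string(text):
--     encoded_str = ""
--     for i, char in enumerate(text):
--         fib = fibonacci(i + 1)
--         encoded_value = ord(char) + fib
--         hex_repr = f"{encoded_value:04x}"  # 4-digit hex
--         encoded_str += hex_repr
--     return encoded_str
-- ===== SOURCE B (Python) =====
-- def encode_to_string(text):
--     parts = []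
--     a, b = 0, 1
--     for char in text:
--         a, b = b, a + b
--         parts.append(f"{ord(char) + a:04x}")
--     return "".join(parts)
-- ===== Notes on version B (the rewrite author's own statement) =====
-- stated objective: faster
-- what changed: B keeps a running Fibonacci pair updated once per character and joins collected hex chunks, instead of recomputing fibonacci(i+1) from scratch for every index and concatenating with +=.
import Mathlib
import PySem

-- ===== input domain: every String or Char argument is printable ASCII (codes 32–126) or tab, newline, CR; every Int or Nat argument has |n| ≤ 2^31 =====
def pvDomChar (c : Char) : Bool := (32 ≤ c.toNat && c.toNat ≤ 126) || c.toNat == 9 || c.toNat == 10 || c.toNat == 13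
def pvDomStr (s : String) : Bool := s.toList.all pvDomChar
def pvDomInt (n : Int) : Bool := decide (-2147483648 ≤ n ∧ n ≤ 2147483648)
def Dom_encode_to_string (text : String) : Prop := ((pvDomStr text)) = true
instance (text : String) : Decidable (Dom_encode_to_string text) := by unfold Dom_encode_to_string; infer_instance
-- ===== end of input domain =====

-- B keeps a running Fibonacci pair (one addition per character) instead of recomputing
-- fibonacci(i+1) from scratch at every index: asymptotically fewer additions.

-- shared helper: exact port of f"{v:04x}" for v ≥ 0 (every encoded value here is positive):
-- lowercase hex digits, left-padded with '0' to width 4, longer if the number needs more digits.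
def pvHexDigit (n : Nat) : Char := if n < 10 then Char.ofNat (48 + n) else Char.ofNat (87 + n)

def pvHexChars (n : Nat) : List Char :=
  if h : n = 0 then [] else pvHexChars (n / 16) ++ [pvHexDigit (n % 16)]
decreasing_by exact Nat.div_lt_self (Nat.pos_of_ne_zero h) (by omega)

def pvHex4 (v : Int) : List Char :=
  let s := pvHexChars v.toNat
  List.replicate (4 - s.length) '0' ++ s

-- ===== PORT A =====
def pvFibonacci (n : Int) : Int :=
  ((PySem.List.pyRange 0 n 1).foldl (fun (ab : Int × Int) _ => (ab.2, ab.1 + ab.2)) (0, 1)).1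

def encode_to_string (text : String) : String :=
  String.ofList ((PySem.List.enumerate text.toList 0).foldl
    (fun acc ic => acc ++ pvHex4 ((ic.2.toNat : Int) + pvFibonacci (ic.1 + 1))) [])

-- ===== PORT B =====
def pvGo : List Char → Int → Int → List Char → List Char
  | [], _, _, acc => acc
  | c :: rest, a, b, acc => pvGo rest b (a + b) (acc ++ pvHex4 ((c.toNat : Int) + b))

def encode_to_string_alt (text : String) : String := String.ofList (pvGo text.toList 0 1 [])

-- ===== PRECONDITION & SPEC =====
def Spec_encode_to_string (text : String) (out : String) : Prop := out = encode_to_string_alt text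
instance (text : String) (out : String) : Decidable (Spec_encode_to_string text out) := by unfold Spec_encode_to_string; infer_instance

-- ===== CLAIM (what is proved, stated in full; the proofs are below) =====
def Claim_equal_encode_to_string : Prop := ∀ (text : String), Dom_encode_to_string text → Spec_encode_to_string text (encode_to_string text)

-- ===== LEMMAS AND PROOFS =====

-- Fibonacci pair after n steps of A's loop
def pvFibP : Nat → Int × Int
  | 0 => (0, 1)
  | n + 1 => ((pvFibP n).2, (pvFibP n).1 + (pvFibP n).2)

theorem pvFib_fold (n : Nat) :
    (PySem.List.pyRange 0 (n : Int) 1).foldl (fun (ab : Int × Int) _ => (ab.2, ab.1 + ab.2)) (0, 1)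
      = pvFibP n := by
  induction n with
  | zero => simp [PySem.List.pyRange_one_eq_nil, pvFibP]
  | succ k ih =>
      rw [show ((k + 1 : Nat) : Int) = (k : Int) + 1 by push_cast; ring,
        PySem.List.pyRange_one_succ_right (show (0:Int) ≤ (k:Int) by omega), List.foldl_append, ih]
      simp [pvFibP]

theorem pvFibonacci_eq (n : Nat) : pvFibonacci (n : Int) = (pvFibP n).1 := by
  simp [pvFibonacci, pvFib_fold]

theorem pvMain (l : List Char) : ∀ (n : Nat) (acc : List Char),
    (PySem.List.enumerate l (n : Int)).foldl
        (fun acc ic => acc ++ pvHex4 ((ic.2.toNat : Int) + pvFibonacci (ic.1 + 1))) acc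
      = pvGo l (pvFibP n).1 (pvFibP n).2 acc := by
  induction l with
  | nil => intro n acc; simp [PySem.List.enumerate_nil, pvGo]
  | cons c rest ih =>
      intro n acc
      rw [PySem.List.enumerate_cons, List.foldl_cons]
      have h1 : ((n : Int) + 1) = ((n + 1 : Nat) : Int) := by push_cast; ring
      rw [h1, ih (n + 1)]
      simp only [pvGo, pvFibonacci_eq, pvFibP]

-- ===== VERDICT (by name: the statement is the Claim_ definition above) =====
theorem encode_to_string_spec : Claim_equal_encode_to_string := by
  intro text _
  unfold Spec_encode_to_string encode_to_string encode_to_string_alt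
  rw [show (0 : Int) = ((0 : Nat) : Int) by norm_num, pvMain]
  rfl
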